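-- pv_equiv track=rewrite | github.com/Natalia-r15/Proyecto-Integrador-Teoria-de-Conjuntos | calculadora_de_conjuntos.py | diferencia
-- ===== SOURCE A (Python) =====
-- def conjunto_corregido(conjunto):
--     conjunto.sort()
--     conjunto_correcto = []
--     for i in range(len(conjunto)):  # Hace que el conjunto no tenga elementos repetidos
--         if conjunto[i] not in conjunto_correcto:
--             conjunto_correcto.append(conjunto[i])
--         else:
--             continue
--     return conjunto_correcto
--
-- def diferencia(conjunto1f,conjunto2f):
--     conjunto1_c = conjunto_corregido(conjunto1f)
--     conjunto2_c = conjunto_corregido(conjunto2f)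
--     conjunto_final = []
--     for i in range (len(conjunto1_c)):
--         if conjunto1_c[i] not in conjunto2_c:
--             conjunto_final.append(conjunto1_c[i])
--         else:
--             continue
--     conjunto_final.sort()
--     return conjunto_final
-- ===== SOURCE B (Python) =====
-- def diferencia(conjunto1f, conjunto2f):
--     # In-place sorts preserved (A sorts both arguments in place too).
--     conjunto1f.sort()
--     conjunto2f.sort()
--     res = []
--     i, j = 0, 0
--     n, m = len(conjunto1f), len(conjunto2f)
--     while i < n:
--         v = conjunto1f[i]
--         i += 1
--         while i < n and conjunto1f[i] == v:   # skip duplicates of v in list 1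
--             i += 1
--         while j < m and conjunto2f[j] < v:    # advance list-2 pointer
--             j += 1
--         if j == m or conjunto2f[j] != v:
--             res.append(v)
--     return res
-- ===== Notes on version B (the rewrite author's own statement) =====
-- stated objective: faster
-- what changed: Replaces the quadratic dedup-by-membership-scan plus per-element linear membership test (and final re-sort) with a single two-pointer merge over the two sorted lists that dedups and subtracts in one pass.
import Mathlib
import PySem

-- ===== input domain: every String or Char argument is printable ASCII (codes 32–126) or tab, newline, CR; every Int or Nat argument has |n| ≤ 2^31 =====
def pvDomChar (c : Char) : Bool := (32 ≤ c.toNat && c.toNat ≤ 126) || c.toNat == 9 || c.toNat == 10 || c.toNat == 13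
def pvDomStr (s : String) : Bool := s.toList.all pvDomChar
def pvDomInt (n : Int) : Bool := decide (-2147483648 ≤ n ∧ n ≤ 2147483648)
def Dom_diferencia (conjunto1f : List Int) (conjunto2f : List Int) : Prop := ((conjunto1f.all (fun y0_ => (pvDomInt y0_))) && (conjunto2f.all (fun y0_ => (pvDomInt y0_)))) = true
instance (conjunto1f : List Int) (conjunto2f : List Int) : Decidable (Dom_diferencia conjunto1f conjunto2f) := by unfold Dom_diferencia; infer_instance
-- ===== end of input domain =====

-- B replaces A's quadratic membership-scan dedup and per-element scan by a two-pointer merge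
-- over the two sorted lists (faster). Both A and B sort the two argument lists in place in
-- Python; the equivalence proved here is about the return value.

-- ===== PORT A =====
-- conjunto_corregido: sort, then append each element not yet in the accumulator
def conjunto_corregido (conjunto : List Int) : List Int :=
  let c := PySem.List.sorted conjunto (fun x => x) false
  c.foldl (fun acc x => if !(acc.contains x) then acc ++ [x] else acc) []

def diferencia (conjunto1f : List Int) (conjunto2f : List Int) : List Int :=
  let conjunto1_c := conjunto_corregido conjunto1f
  let conjunto2_c := conjunto_corregido conjunto2f
  let conjunto_final :=
    conjunto1_c.foldl (fun acc x => if !(conjunto2_c.contains x) then acc ++ [x] else acc) []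
  PySem.List.sorted conjunto_final (fun x => x) false

-- ===== PORT B =====
-- two-pointer merge: skip duplicates of v in s1, drop elements < v of s2, emit v unless matched
def mergeDiff : List Int → List Int → List Int
  | [], _ => []
  | v :: rest, s2 =>
      let rest' := rest.dropWhile (fun x => x == v)
      let s2' := s2.dropWhile (fun y => decide (y < v))
      if s2'.head? = some v then mergeDiff rest' s2'
      else v :: mergeDiff rest' s2'
termination_by s1 _ => s1.length
decreasing_by all_goals
  exact Nat.lt_succ_of_le (List.length_dropWhile_le _ _)

def diferencia_alt (conjunto1f : List Int) (conjunto2f : List Int) : List Int :=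
  mergeDiff (PySem.List.sorted conjunto1f (fun x => x) false)
            (PySem.List.sorted conjunto2f (fun x => x) false)

-- ===== PRECONDITION & SPEC =====
def Spec_diferencia (conjunto1f : List Int) (conjunto2f : List Int) (out : List Int) : Prop := out = diferencia_alt conjunto1f conjunto2f
instance (conjunto1f : List Int) (conjunto2f : List Int) (out : List Int) : Decidable (Spec_diferencia conjunto1f conjunto2f out) := by unfold Spec_diferencia; infer_instance

-- ===== CLAIM (what is proved, stated in full; the proofs are below) =====
def Claim_equal_diferencia : Prop := ∀ (conjunto1f : List Int) (conjunto2f : List Int), Dom_diferencia conjunto1f conjunto2f → Spec_diferencia conjunto1f conjunto2f (diferencia conjunto1f conjunto2f)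

-- ===== LEMMAS AND PROOFS =====

-- canonical form: remove runs of consecutive duplicates
def dedupS : List Int → List Int
  | [] => []
  | v :: rest => v :: dedupS (rest.dropWhile (fun x => x == v))
termination_by s => s.length
decreasing_by
  exact Nat.lt_succ_of_le (List.length_dropWhile_le _ _)

theorem mem_dedupS (s : List Int) (x : Int) : x ∈ dedupS s ↔ x ∈ s := by
  induction s using dedupS.induct with
  | case1 => simp [dedupS]
  | case2 v rest ih =>
    rw [dedupS]
    simp only [List.mem_cons, ih]
    constructor
    · rintro (rfl | h)
      · exact Or.inl rfl
      · exact Or.inr ((List.dropWhile_sublist _).mem h)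
    · rintro (rfl | h)
      · exact Or.inl rfl
      · by_cases hxv : x = v
        · exact Or.inl hxv
        · refine Or.inr ?_
          have hsplit := List.takeWhile_append_dropWhile (p := fun x => x == v) (l := rest)
          rcases List.mem_append.mp (hsplit ▸ h) with h1 | h2
          · exact absurd (by simpa using List.mem_takeWhile_imp h1) hxv
          · exact h2

theorem dedupS_sublist (s : List Int) : (dedupS s).Sublist s := by
  induction s using dedupS.induct with
  | case1 => simp [dedupS]
  | case2 v rest ih =>
    rw [dedupS]
    exact (ih.trans (List.dropWhile_sublist _)).cons₂ v

theorem dropWhile_gt (v : Int) (l : List Int) (hp : l.Pairwise (· ≤ ·))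
    (hge : ∀ x ∈ l, v ≤ x) : ∀ x ∈ l.dropWhile (fun x => x == v), v < x := by
  induction l with
  | nil => simp
  | cons a t ih =>
    rw [List.pairwise_cons] at hp
    by_cases hav : a = v
    · rw [List.dropWhile_cons_of_pos (by simpa using hav)]
      exact ih hp.2 (fun x hx => hge x (List.mem_cons_of_mem a hx))
    · rw [List.dropWhile_cons_of_neg (by simpa using hav)]
      intro x hx
      rcases List.mem_cons.mp hx with rfl | hx
      · exact lt_of_le_of_ne (hge x (List.mem_cons_self ..)) (Ne.symm hav)
      · exact lt_of_lt_of_le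
          (lt_of_le_of_ne (hge a (List.mem_cons_self ..)) (Ne.symm hav)) (hp.1 x hx)

theorem dropWhile_lt_ge (v : Int) (l : List Int) (hp : l.Pairwise (· ≤ ·)) :
    ∀ x ∈ l.dropWhile (fun y => decide (y < v)), v ≤ x := by
  induction l with
  | nil => simp
  | cons a t ih =>
    rw [List.pairwise_cons] at hp
    by_cases hav : a < v
    · rw [List.dropWhile_cons_of_pos (by simpa using hav)]
      exact ih hp.2
    · rw [List.dropWhile_cons_of_neg (by simpa using hav)]
      intro x hx
      rcases List.mem_cons.mp hx with rfl | hx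
      · exact le_of_not_gt hav
      · exact le_trans (le_of_not_gt hav) (hp.1 x hx)

theorem mem_dropWhile_lt (v x : Int) (l : List Int) (hvx : v ≤ x) :
    x ∈ l.dropWhile (fun y => decide (y < v)) ↔ x ∈ l := by
  constructor
  · exact fun h => (List.dropWhile_sublist _).mem h
  · intro h
    have hsplit := List.takeWhile_append_dropWhile (p := fun y => decide (y < v)) (l := l)
    rcases List.mem_append.mp (hsplit ▸ h) with h1 | h2
    · exact absurd (by simpa using List.mem_takeWhile_imp h1) (not_lt.mpr hvx)
    · exact h2

theorem head_dropWhile_iff_mem (v : Int) (l : List Int) (hp : l.Pairwise (· ≤ ·)) :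
    (l.dropWhile (fun y => decide (y < v))).head? = some v ↔ v ∈ l := by
  constructor
  · intro h
    exact (List.dropWhile_sublist _).mem (List.mem_of_mem_head? (by rw [h]; simp))
  · intro h
    have hmem : v ∈ l.dropWhile (fun y => decide (y < v)) :=
      (mem_dropWhile_lt v v l le_rfl).mpr h
    have hge := dropWhile_lt_ge v l hp
    have hpd : (l.dropWhile (fun y => decide (y < v))).Pairwise (· ≤ ·) :=
      hp.sublist (List.dropWhile_sublist _)
    cases hd : l.dropWhile (fun y => decide (y < v)) with
    | nil => rw [hd] at hmem; simp at hmem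
    | cons a t =>
      rw [hd] at hmem hge hpd
      rw [List.pairwise_cons] at hpd
      have hva : v ≤ a := hge a (List.mem_cons_self ..)
      rcases List.mem_cons.mp hmem with rfl | hv
      · simp
      · have : a ≤ v := hpd.1 v hv
        simp [le_antisymm this hva]

theorem foldl_dedup_skip (l : List Int) (acc : List Int)
    (h : ∀ x ∈ l, x ∈ acc) :
    l.foldl (fun acc x => if !(acc.contains x) then acc ++ [x] else acc) acc = acc := by
  induction l with
  | nil => rfl
  | cons a t ih =>
    rw [List.foldl_cons]
    have ha : acc.contains a = true := by
      simpa using h a (List.mem_cons_self ..)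
    rw [ha]
    exact ih (fun x hx => h x (List.mem_cons_of_mem a hx))

theorem foldl_dedup_eq (s : List Int) (acc : List Int)
    (hp : s.Pairwise (· ≤ ·)) (hd : ∀ x ∈ s, x ∉ acc) :
    s.foldl (fun acc x => if !(acc.contains x) then acc ++ [x] else acc) acc
      = acc ++ dedupS s := by
  induction s using dedupS.induct generalizing acc with
  | case1 => simp [dedupS]
  | case2 v rest ih =>
    rw [List.pairwise_cons] at hp
    have hvacc : acc.contains v = false := by
      simpa using hd v (List.mem_cons_self ..)
    rw [List.foldl_cons, if_pos (by simpa using hd v (List.mem_cons_self ..))]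
    have hstep :
        rest.foldl (fun acc x => if !(acc.contains x) then acc ++ [x] else acc) (acc ++ [v])
          = (rest.dropWhile (fun x => x == v)).foldl
              (fun acc x => if !(acc.contains x) then acc ++ [x] else acc) (acc ++ [v]) := by
      conv_lhs =>
        rw [← List.takeWhile_append_dropWhile (p := fun x => x == v) (l := rest)]
      rw [List.foldl_append, foldl_dedup_skip (List.takeWhile (fun x => x == v) rest)
        (acc ++ [v]) (fun x hx => by
        have hxv : x = v := by simpa using List.mem_takeWhile_imp hx
        simp [hxv])]
    rw [hstep]
    have hgt := dropWhile_gt v rest hp.2 hp.1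
    rw [ih (acc ++ [v]) (hp.2.sublist (List.dropWhile_sublist _)) (fun x hx => by
      have hxv : v < x := hgt x hx
      have hxrest : x ∈ rest := (List.dropWhile_sublist _).mem hx
      simp only [List.mem_append, List.mem_singleton]
      rintro (hin | rfl)
      · exact hd x (List.mem_cons_of_mem v hxrest) hin
      · exact absurd hxv (lt_irrefl x))]
    rw [dedupS]
    simp

theorem corregido_eq (c : List Int) :
    conjunto_corregido c = dedupS (PySem.List.sorted c (fun x => x) false) := by
  unfold conjunto_corregido
  rw [foldl_dedup_eq _ _ (by simpa using PySem.List.sorted_pairwise c (fun x => x)) (by simp)]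
  simp

theorem mergeDiff_eq_aux (n : Nat) : ∀ (s1 s2 : List Int), s1.length ≤ n →
    s1.Pairwise (· ≤ ·) → s2.Pairwise (· ≤ ·) →
    mergeDiff s1 s2 = (dedupS s1).filter (fun v => !(s2.contains v)) := by
  induction n with
  | zero =>
    intro s1 s2 hlen _ _
    have : s1 = [] := List.length_eq_zero_iff.mp (Nat.le_zero.mp hlen)
    subst this
    simp [mergeDiff, dedupS]
  | succ n ih =>
    intro s1 s2 hlen h1 h2
    cases s1 with
    | nil => simp [mergeDiff, dedupS]
    | cons v rest =>
      rw [List.pairwise_cons] at h1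
      have hr'P : (rest.dropWhile (fun x => x == v)).Pairwise (· ≤ ·) :=
        h1.2.sublist (List.dropWhile_sublist _)
      have hs2'P : (s2.dropWhile (fun y => decide (y < v))).Pairwise (· ≤ ·) :=
        h2.sublist (List.dropWhile_sublist _)
      have hgt := dropWhile_gt v rest h1.2 h1.1
      have hlen' : (rest.dropWhile (fun x => x == v)).length ≤ n :=
        le_trans (List.length_dropWhile_le _ _) (Nat.le_of_succ_le_succ hlen)
      have hrec := ih _ _ hlen' hr'P hs2'P
      have hcontains : ∀ x ∈ dedupS (rest.dropWhile (fun x => x == v)),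
          ((s2.dropWhile (fun y => decide (y < v))).contains x) = (s2.contains x) := by
        intro x hx
        have hvx : v ≤ x := le_of_lt (hgt x ((mem_dedupS _ _).mp hx))
        rw [Bool.eq_iff_iff]
        simp [mem_dropWhile_lt v x s2 hvx]
      rw [mergeDiff, dedupS]
      by_cases hmem : (s2.dropWhile (fun y => decide (y < v))).head? = some v
      · rw [if_pos hmem]
        have hv2 : v ∈ s2 := (head_dropWhile_iff_mem v s2 h2).mp hmem
        rw [List.filter_cons, if_neg (by simp [hv2]), hrec]
        exact List.filter_congr (fun x hx => by rw [hcontains x hx])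
      · rw [if_neg hmem]
        have hv2 : v ∉ s2 := fun h => hmem ((head_dropWhile_iff_mem v s2 h2).mpr h)
        rw [List.filter_cons, if_pos (by simp [hv2]), hrec]
        congr 1
        exact List.filter_congr (fun x hx => by rw [hcontains x hx])

theorem mergeDiff_eq (s1 s2 : List Int) (h1 : s1.Pairwise (· ≤ ·)) (h2 : s2.Pairwise (· ≤ ·)) :
    mergeDiff s1 s2 = (dedupS s1).filter (fun v => !(s2.contains v)) :=
  mergeDiff_eq_aux s1.length s1 s2 le_rfl h1 h2

-- ===== VERDICT (by name: the statement is the Claim_ definition above) =====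
theorem diferencia_spec : Claim_equal_diferencia := by
  intro c1 c2 _
  unfold Spec_diferencia diferencia diferencia_alt
  have hp1 : (PySem.List.sorted c1 (fun x => x) false).Pairwise (· ≤ ·) := by
    simpa using PySem.List.sorted_pairwise c1 (fun x => x)
  have hp2 : (PySem.List.sorted c2 (fun x => x) false).Pairwise (· ≤ ·) := by
    simpa using PySem.List.sorted_pairwise c2 (fun x => x)
  show PySem.List.sorted
      ((conjunto_corregido c1).foldl
        (fun acc x => if !((conjunto_corregido c2).contains x) then acc ++ [x] else acc) [])
      (fun x => x) false
    = mergeDiff (PySem.List.sorted c1 (fun x => x) false) (PySem.List.sorted c2 (fun x => x) false)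
  rw [mergeDiff_eq _ _ hp1 hp2, corregido_eq, corregido_eq,
    PySem.List.foldl_append_if_eq_filter, List.nil_append]
  rw [List.filter_congr (fun x _ => by
    rw [Bool.eq_iff_iff]
    simp [mem_dedupS] :
    ∀ x ∈ dedupS (PySem.List.sorted c1 (fun x => x) false),
      (fun x => !((dedupS (PySem.List.sorted c2 (fun x => x) false)).contains x)) x
        = (fun v => !((PySem.List.sorted c2 (fun x => x) false).contains v)) x)]
  apply PySem.List.sorted_eq_self_of_pairwise
  exact hp1.sublist (List.filter_sublist.trans (dedupS_sublist _))
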